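-- pv_equiv track=rewrite | github.com/miliar/Code_Jam_Webscraper | solutions_python/Problem_155/470.py | solve
-- ===== SOURCE A (Python) =====
-- def solve(s_max, counts):
--     needed = 0
--     standing = 0
--     for s in range(s_max+1):
--         x = max(s - standing, 0)
--         needed += x
--         standing += x + counts[s]
--     return needed
-- ===== SOURCE B (Python) =====
-- def solve(s_max, counts):
--     # Pass 1: prefix sums of the relevant audience counts.
--     prefix = [0]
--     for c in counts[:s_max + 1]:
--         prefix.append(prefix[-1] + c)
--     # Pass 2: the answer is the maximum deficit s - prefix[s], clamped at 0.
--     best = 0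
--     for s in range(s_max + 1):
--         best = max(best, s - prefix[s])
--     return best
-- ===== Notes on version B (the rewrite author's own statement) =====
-- stated objective: alternative
-- what changed: B replaces A's single greedy pass (which folds hired friends back into the standing count) by two staged passes: first build the list of audience prefix sums, then scan for the maximum deficit s - prefix[s] clamped at 0.
import Mathlib
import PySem

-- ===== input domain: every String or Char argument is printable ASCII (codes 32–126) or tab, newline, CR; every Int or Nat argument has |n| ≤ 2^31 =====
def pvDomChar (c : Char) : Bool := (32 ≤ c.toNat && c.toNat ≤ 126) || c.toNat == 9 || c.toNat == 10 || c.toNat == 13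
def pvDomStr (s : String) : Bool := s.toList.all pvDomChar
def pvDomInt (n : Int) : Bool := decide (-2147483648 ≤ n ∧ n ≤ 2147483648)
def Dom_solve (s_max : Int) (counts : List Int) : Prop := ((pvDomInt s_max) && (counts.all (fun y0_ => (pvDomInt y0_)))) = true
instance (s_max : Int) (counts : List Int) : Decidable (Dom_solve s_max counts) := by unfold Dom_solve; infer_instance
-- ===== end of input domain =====

-- B replaces A's greedy single pass by two staged passes: build the audience prefix-sum list,
-- then scan for the maximum deficit s - prefix[s] clamped at 0 (alternative decomposition).

-- ===== PORT A =====
-- state = (needed, standing); counts[s] via pyGetD (in range on all inputs admitted by Pre_solve)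
def solve (s_max : Int) (counts : List Int) : Int :=
  ((PySem.List.pyRange 0 (s_max + 1) 1).foldl
    (fun (st : Int × Int) s =>
      let x := max (s - st.2) 0
      (st.1 + x, st.2 + x + PySem.List.pyGetD counts s 0))
    (0, 0)).1

-- ===== PORT B =====
-- pass 1: prefix sums of counts[:s_max+1] by appending prefix[-1] + c;
-- pass 2: best = max(best, s - prefix[s]) over range(s_max+1)
def solve_alt (s_max : Int) (counts : List Int) : Int :=
  let pref := (PySem.List.slice counts none (some (s_max + 1))).foldl
    (fun (p : List Int) c => p ++ [PySem.List.pyGetD p (-1) 0 + c]) [0]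
  (PySem.List.pyRange 0 (s_max + 1) 1).foldl
    (fun best s => max best (s - PySem.List.pyGetD pref s 0)) 0

-- ===== PRECONDITION & SPEC =====
-- Pre_ excludes exactly the inputs on which A raises IndexError (0 ≤ s_max and s_max ≥ len(counts))
def Pre_solve (s_max : Int) (counts : List Int) : Prop := s_max < (counts.length : Int)
instance (s_max : Int) (counts : List Int) : Decidable (Pre_solve s_max counts) := by unfold Pre_solve; infer_instance
def pvWitness_solve : Int × List Int := (2, [1, 0, 2])

def Spec_solve (s_max : Int) (counts : List Int) (out : Int) : Prop := out = solve_alt s_max counts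
instance (s_max : Int) (counts : List Int) (out : Int) : Decidable (Spec_solve s_max counts out) := by unfold Spec_solve; infer_instance

-- ===== CLAIM (what is proved, stated in full; the proofs are below) =====
def Claim_equal_solve : Prop := ∀ (s_max : Int) (counts : List Int), Dom_solve s_max counts → Pre_solve s_max counts → Spec_solve s_max counts (solve s_max counts)

-- ===== LEMMAS AND PROOFS =====

-- prefix sum of the first k counts
def pvS (counts : List Int) (k : Nat) : Int := (counts.take k).sum

-- reference value: maximum deficit over the first n levels (clamped at 0)
def pvN (counts : List Int) : Nat → Int
  | 0 => 0
  | k + 1 => max (pvN counts k) ((k : Int) - pvS counts k)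

-- B's first pass builds exactly the list of prefix sums of l
theorem pv_prefix (l : List Int) :
    l.foldl (fun (p : List Int) c => p ++ [PySem.List.pyGetD p (-1) 0 + c]) [0]
      = (List.range (l.length + 1)).map (fun k => (l.take k).sum) := by
  induction l using List.reverseRecOn with
  | nil => simp
  | append_singleton l c ih =>
    rw [List.foldl_append, ih]
    simp only [List.foldl_cons, List.foldl_nil]
    rw [List.range_succ, List.map_append, List.map_singleton, List.append_assoc,
        PySem.List.pyGetD_neg_one_append_singleton,
        List.length_append, List.length_singleton, List.range_succ, List.map_append,
        List.range_succ, List.map_append]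
    have hmap : (List.range (l.length + 1)).map (fun k => (List.take k (l ++ [c])).sum)
        = (List.range (l.length + 1)).map (fun k => (List.take k l).sum) := by
      apply List.map_congr_left
      intro k hk
      simp only [List.mem_range] at hk
      rw [List.take_append_of_le_length (by omega)]
    rw [List.range_succ, List.map_append] at hmap
    rw [hmap]
    simp [List.take_append, List.take_of_length_le (by omega : l.length ≤ l.length + 1)]

-- A's fold over range(n) lands at (pvN n, pvN n + pvS n)
theorem pv_A (counts : List Int) (n : Nat) (h : n ≤ counts.length) :
    (PySem.List.pyRange 0 (n : Int) 1).foldl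
      (fun (st : Int × Int) s =>
        let x := max (s - st.2) 0
        (st.1 + x, st.2 + x + PySem.List.pyGetD counts s 0))
      (0, 0) = (pvN counts n, pvN counts n + pvS counts n) := by
  induction n with
  | zero => simp [pvN, pvS]
  | succ k ih =>
    have hk : k ≤ counts.length := by omega
    rw [show ((k + 1 : Nat) : Int) = (k : Int) + 1 by push_cast; ring,
        PySem.List.pyRange_one_succ_right (by positivity), List.foldl_append, ih hk]
    simp only [List.foldl_cons, List.foldl_nil, PySem.List.pyGetD_natCast]
    have hget : counts.getD k 0 = counts[k]'(by omega) := List.getD_eq_getElem counts 0 (by omega)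
    have hsum : pvS counts (k + 1) = pvS counts k + counts[k]'(by omega) := by
      simp [pvS, List.sum_take_succ counts k (by omega)]
    refine Prod.ext ?_ ?_ <;> simp only [pvN, hget, hsum] <;> omega

-- B's second pass over range(n) computes pvN n, given the lookups hit the prefix sums
theorem pv_B (counts prefix_ : List Int) (n : Nat)
    (h : ∀ k : Nat, k < n → PySem.List.pyGetD prefix_ (k : Int) 0 = pvS counts k) :
    (PySem.List.pyRange 0 (n : Int) 1).foldl
      (fun best s => max best (s - PySem.List.pyGetD prefix_ s 0)) 0 = pvN counts n := by
  induction n with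
  | zero => simp [pvN]
  | succ k ih =>
    rw [show ((k + 1 : Nat) : Int) = (k : Int) + 1 by push_cast; ring,
        PySem.List.pyRange_one_succ_right (by positivity), List.foldl_append,
        ih (fun j hj => h j (by omega))]
    simp only [List.foldl_cons, List.foldl_nil, h k (by omega), pvN]

-- ===== VERDICT (by name: the statement is the Claim_ definition above) =====
theorem solve_spec : Claim_equal_solve := by
  intro s_max counts _ hpre
  unfold Pre_solve at hpre
  unfold Spec_solve solve solve_alt
  by_cases hneg : s_max + 1 ≤ 0
  · rw [PySem.List.pyRange_one_eq_nil hneg]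
    simp
  · rw [not_le] at hneg
    have h0 : 0 ≤ s_max := by omega
    set n : Nat := (s_max + 1).toNat with hn
    have hcast : ((n : Int)) = s_max + 1 := by omega
    have hlen : n ≤ counts.length := by omega
    rw [← hcast, pv_A counts n hlen, pv_B counts _ n ?_]
    intro k hk
    rw [PySem.List.slice_to_natCast, pv_prefix]
    have hlt : k < (counts.take n).length + 1 := by
      simp only [List.length_take]; omega
    rw [PySem.List.pyGetD_natCast]
    rw [List.getD_eq_getElem _ 0 (by simpa using hlt)]
    simp only [List.getElem_map, List.getElem_range]
    rw [List.take_take, min_eq_left (le_of_lt hk)]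
    rfl
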